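-- pv_equiv track=rewrite | github.com/bbaktaeho/all-my-studies | codingTest/baekjoon/python/2484.py | showMeTheMoney
-- ===== SOURCE A (Python) =====
-- def showMeTheMoney(l):
--     s = set(l)
--     if len(s) == 1:
--         return 50000 + (l[0] * 5000)
--     ls = sorted(l)
--     if len(s) == 2:
--         if ls[1] == ls[2]:
--             return 10000 + (ls[1] * 1000)
--         else:
--             return 2000 + (ls[0] * 500) + (ls[2] * 500)
--     if len(s) == 3:
--         for i in range(len(ls)):
--             if ls[i] == ls[i + 1]:
--                 return 1000 + (ls[i] * 100)
--     return ls[3] * 100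
-- ===== SOURCE B (Python) =====
-- def showMeTheMoney(l):
--     # frequency-pattern classification: sorted distinct values + their counts,
--     # no sort of l and no positional scanning of adjacent pairs
--     vals = sorted(set(l))
--     if len(vals) == 1:
--         return 50000 + l[0] * 5000
--     if len(vals) == 2:
--         a, b = vals
--         ca = l.count(a)
--         if ca == 2:
--             return 2000 + (a + b) * 500
--         if ca == 1:
--             return 10000 + b * 1000
--         return 10000 + a * 1000
--     if len(vals) == 3:
--         dup = next(v for v in vals if l.count(v) >= 2)
--         return 1000 + dup * 100
--     # >= 4 distinct values: 4th order statistic via cumulative counts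
--     c = 0
--     for v in vals:
--         c += l.count(v)
--         if c >= 4:
--             return v * 100
-- ===== Notes on version B (the rewrite author's own statement) =====
-- stated objective: alternative
-- what changed: Replaces A's sort of the whole list plus positional/adjacent-pair scanning with a frequency-pattern classification over the sorted distinct values and their counts (count==2/==1 pattern for two values, first value with count>=2 for three, cumulative counts for the 4th order statistic).
import Mathlib
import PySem

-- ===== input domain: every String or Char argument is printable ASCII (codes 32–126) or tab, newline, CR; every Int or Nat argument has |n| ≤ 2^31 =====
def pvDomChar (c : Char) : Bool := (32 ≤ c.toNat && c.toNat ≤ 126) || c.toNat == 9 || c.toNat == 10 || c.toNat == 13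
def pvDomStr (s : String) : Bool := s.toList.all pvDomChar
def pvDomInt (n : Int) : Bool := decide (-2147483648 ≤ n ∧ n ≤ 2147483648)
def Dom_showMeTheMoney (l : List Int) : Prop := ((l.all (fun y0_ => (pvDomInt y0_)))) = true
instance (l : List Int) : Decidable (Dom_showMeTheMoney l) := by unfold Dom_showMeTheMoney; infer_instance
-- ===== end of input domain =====

-- B replaces A's full-list sort plus positional/adjacent-pair scanning by a frequency-pattern
-- classification over the sorted distinct values and their counts (alternative algorithm, same cost).
-- Pre_ is exactly the inputs where A returns (elsewhere A raises IndexError).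


-- ===== PORT A =====
-- 'for i in range(len(ls)): if ls[i] == ls[i+1]: return 1000 + ls[i]*100'; none = fell through
def pvLoopA (ls : List Int) : List Int → Option Int
  | [] => none
  | i :: rest =>
    if PySem.List.pyGetD ls i 0 = PySem.List.pyGetD ls (i + 1) 0 then
      some (1000 + PySem.List.pyGetD ls i 0 * 100)
    else pvLoopA ls rest

def showMeTheMoney (l : List Int) : Int :=
  let s := PySem.Set.ofList l
  if s.length = 1 then 50000 + (PySem.List.pyGetD l 0 0) * 5000
  else
    let ls := PySem.List.sorted l (fun x => x) false
    if s.length = 2 then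
      if PySem.List.pyGetD ls 1 0 = PySem.List.pyGetD ls 2 0 then
        10000 + (PySem.List.pyGetD ls 1 0) * 1000
      else
        2000 + (PySem.List.pyGetD ls 0 0) * 500 + (PySem.List.pyGetD ls 2 0) * 500
    else if s.length = 3 then
      match pvLoopA ls (PySem.List.pyRange 0 ls.length 1) with
      | some r => r
      | none => PySem.List.pyGetD ls 3 0 * 100
    else PySem.List.pyGetD ls 3 0 * 100

-- ===== PORT B =====
-- 'c = 0; for v in vals: c += l.count(v); if c >= 4: return v * 100'
-- (falling off the loop returns None in Python; 0 here — unreachable under Pre_)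
def pvOrdLoop (l : List Int) (c : Int) : List Int → Int
  | [] => 0
  | v :: vs =>
    if 4 ≤ c + (PySem.List.count l v : Int) then v * 100
    else pvOrdLoop l (c + (PySem.List.count l v : Int)) vs

def showMeTheMoney_alt (l : List Int) : Int :=
  let vals := PySem.List.sorted (PySem.Set.ofList l) (fun x => x) false
  if vals.length = 1 then 50000 + PySem.List.pyGetD l 0 0 * 5000
  else if vals.length = 2 then
    let a := PySem.List.pyGetD vals 0 0
    let b := PySem.List.pyGetD vals 1 0
    let ca := PySem.List.count l a
    if ca = 2 then 2000 + (a + b) * 500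
    else if ca = 1 then 10000 + b * 1000
    else 10000 + a * 1000
  else if vals.length = 3 then
    -- 'next(v for v in vals if l.count(v) >= 2)'; none = StopIteration, unreachable under Pre_
    match vals.find? (fun v => 2 ≤ PySem.List.count l v) with
    | some dup => 1000 + dup * 100
    | none => 0
  else pvOrdLoop l 0 vals

-- ===== PRECONDITION & SPEC =====
-- Pre_: exactly the inputs on which A returns. With D distinct values, A raises IndexError when
-- D = 0 (empty list), D = 2 with fewer than 3 dice, or D = 3 with fewer than 4 dice; it returns
-- everywhere else.
def Pre_showMeTheMoney (l : List Int) : Prop :=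
  (PySem.Set.ofList l).length = 1 ∨
  ((PySem.Set.ofList l).length = 2 ∧ 3 ≤ l.length) ∨
  ((PySem.Set.ofList l).length = 3 ∧ 4 ≤ l.length) ∨
  4 ≤ (PySem.Set.ofList l).length
instance (l : List Int) : Decidable (Pre_showMeTheMoney l) := by unfold Pre_showMeTheMoney; infer_instance
def pvWitness_showMeTheMoney : List Int := [3, 3, 6, 3]

def Spec_showMeTheMoney (l : List Int) (out : Int) : Prop := out = showMeTheMoney_alt l
instance (l : List Int) (out : Int) : Decidable (Spec_showMeTheMoney l out) := by unfold Spec_showMeTheMoney; infer_instance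

-- ===== CLAIM (what is proved, stated in full; the proofs are below) =====
def Claim_equal_showMeTheMoney : Prop := ∀ (l : List Int), Dom_showMeTheMoney l → Pre_showMeTheMoney l → Spec_showMeTheMoney l (showMeTheMoney l)

-- ===== LEMMAS AND PROOFS =====

-- the sorted list, expressed by blocks of equal values (vals = sorted distinct values)
def pvFlat (l : List Int) (vs : List Int) : List Int :=
  vs.flatMap (fun v => List.replicate (l.count v) v)

theorem pvCount_flat (l : List Int) : ∀ (vs : List Int), vs.Nodup → ∀ (x : Int),
    (pvFlat l vs).count x = if x ∈ vs then l.count x else 0 := by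
  intro vs
  induction vs with
  | nil => intro _ x; simp [pvFlat]
  | cons v vs ih =>
    intro hnd x
    have hnd' := (List.nodup_cons.mp hnd).2
    have hnv := (List.nodup_cons.mp hnd).1
    simp only [pvFlat, List.flatMap_cons, List.count_append]
    rw [show (vs.flatMap fun v => List.replicate (l.count v) v) = pvFlat l vs from rfl,
        ih hnd' x, List.count_replicate]
    by_cases hx : x = v
    · subst hx; simp [hnv]
    · simp [Ne.symm hx, fun h : x = v => hx h]

theorem pvFlat_perm (l : List Int) (vs : List Int) (hnd : vs.Nodup)
    (hmem : ∀ x, x ∈ vs ↔ x ∈ l) : (pvFlat l vs).Perm l := by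
  rw [List.perm_iff_count]
  intro x
  rw [pvCount_flat l vs hnd x]
  by_cases hx : x ∈ vs
  · simp [hx]
  · have : x ∉ l := fun h => hx ((hmem x).mpr h)
    simp [hx, List.count_eq_zero.mpr this]

theorem pvFlat_pairwise (l : List Int) : ∀ (vs : List Int),
    vs.Pairwise (· < ·) → (pvFlat l vs).Pairwise (· ≤ ·) := by
  intro vs
  induction vs with
  | nil => intro _; simp [pvFlat]
  | cons v vs ih =>
    intro hpw
    simp only [pvFlat, List.flatMap_cons]
    rw [List.pairwise_append]
    refine ⟨?_, ih (List.pairwise_cons.mp hpw).2, ?_⟩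
    · exact List.pairwise_replicate.mpr (Or.inr le_rfl)
    · intro x hx y hy
      have hxv : x = v := List.eq_of_mem_replicate hx
      obtain ⟨u, hu, hyu⟩ := List.mem_flatMap.mp hy
      have hyu' : y = u := List.eq_of_mem_replicate hyu
      rw [hxv, hyu']
      exact le_of_lt ((List.pairwise_cons.mp hpw).1 u hu)

-- sorted(l) is exactly the block decomposition over vals = sorted(set(l))
theorem pvSorted_eq_flat (l : List Int) :
    PySem.List.sorted l (fun x => x) false =
      pvFlat l (PySem.List.sorted (PySem.Set.ofList l) (fun x => x) false) := by
  apply PySem.List.sorted_id_eq_of_perm_of_pairwise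
  · apply pvFlat_perm
    · exact (PySem.List.sorted_perm _ _ _).nodup_iff.mpr (PySem.Set.nodup_ofList l)
    · intro x
      rw [PySem.List.mem_sorted, PySem.Set.mem_ofList]
  · exact pvFlat_pairwise l _ (PySem.List.sorted_ofList_pairwise_lt l)

theorem pvFlat_length (l : List Int) : ∀ (vs : List Int),
    (∀ v ∈ vs, 1 ≤ l.count v) → vs.length ≤ (pvFlat l vs).length := by
  intro vs
  induction vs with
  | nil => intro _; simp [pvFlat]
  | cons v vs ih =>
    intro h
    simp only [pvFlat, List.flatMap_cons, List.length_append, List.length_replicate, List.length_cons]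
    have h1 := h v (by simp)
    have h2 := ih (fun u hu => h u (by simp [hu]))
    simp only [pvFlat] at h2
    omega

-- first element equal to its predecessor in a sorted list (A's loop body, functionally)
def pvFd : Int → List Int → Option Int
  | _, [] => none
  | p, x :: xs => if x = p then some x else pvFd x xs

-- the A-side index loop finds the first adjacent duplicate
theorem pvLoop_finds : ∀ (xs : List Int) (pre : List Int) (p v : Int),
    pvFd p xs = some v →
    pvLoopA (pre ++ p :: xs) (PySem.List.pyRange pre.length (pre ++ p :: xs).length 1) =
      some (1000 + v * 100) := by
  intro xs
  induction xs with
  | nil => intro pre p v h; simp [pvFd] at h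
  | cons y t ih =>
    intro pre p v h
    have hlen : (pre.length : Int) < ((pre ++ p :: y :: t).length : Int) := by simp; omega
    rw [PySem.List.pyRange_one_cons hlen]
    simp only [pvLoopA]
    have hg1 : PySem.List.pyGetD (pre ++ p :: y :: t) pre.length 0 = p := by
      rw [PySem.List.pyGetD_natCast]
      simp [List.getD_eq_getElem?_getD]
    have hg2 : PySem.List.pyGetD (pre ++ p :: y :: t) ((pre.length : Int) + 1) 0 = y := by
      have : ((pre.length : Int) + 1) = ((pre ++ [p]).length : Nat) := by simp
      rw [this, PySem.List.pyGetD_natCast]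
      have he : pre ++ p :: y :: t = (pre ++ [p]) ++ y :: t := by simp
      rw [he]
      simp [List.getD_eq_getElem?_getD]
    rw [hg1, hg2]
    by_cases hpy : p = y
    · subst hpy
      have hv : p = v := by simpa [pvFd] using h
      simp [hv]
    · rw [if_neg hpy]
      have h' : pvFd y t = some v := by
        simp only [pvFd] at h
        rwa [if_neg (fun e : y = p => hpy e.symm)] at h
      have := ih (pre ++ [p]) y v h'
      have he : (pre ++ [p]) ++ y :: t = pre ++ p :: y :: t := by simp
      rw [he] at this
      have hc : ((pre ++ [p]).length : Int) = (pre.length : Int) + 1 := by simp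
      rw [hc] at this
      exact this

-- B's cumulative-count loop computes the 4th order statistic of the block decomposition
theorem pvOrdLoop_get (l : List Int) : ∀ (vs : List Int) (c : Int), 0 ≤ c → c ≤ 3 →
    (3 - c).toNat < (pvFlat l vs).length →
    pvOrdLoop l c vs = (pvFlat l vs).getD (3 - c).toNat 0 * 100 := by
  intro vs
  induction vs with
  | nil => intro c _ _ h; simp [pvFlat] at h
  | cons v vs ih =>
    intro c hc0 hc3 hlt
    have hcnt : (PySem.List.count l v : Int) = (l.count v : Int) := by
      rw [PySem.List.count_eq]
    simp only [pvOrdLoop, hcnt]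
    simp only [pvFlat, List.flatMap_cons] at hlt ⊢
    rw [List.getD_eq_getElem?_getD]
    by_cases h4 : 4 ≤ c + (l.count v : Int)
    · rw [if_pos h4]
      have hlt' : (3 - c).toNat < l.count v := by omega
      rw [List.getElem?_append_left (by simpa using hlt'), List.getElem?_replicate, if_pos hlt']
      simp
    · rw [if_neg h4]
      have hk : (l.count v : Int) ≤ 3 - c := by omega
      have hge : l.count v ≤ (3 - c).toNat := by omega
      rw [List.getElem?_append_right (by simpa using hge)]
      have harith : (3 - c).toNat - (List.replicate (l.count v) v).length = (3 - (c + (l.count v : Int))).toNat := by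
        simp only [List.length_replicate]; omega
      rw [harith]
      have := ih (c + (l.count v : Int)) (by omega) (by omega)
        (by simp only [pvFlat]; simp only [List.length_append, List.length_replicate] at hlt; omega)
      rw [this, List.getD_eq_getElem?_getD]
      simp only [pvFlat]

-- ===== VERDICT (by name: the statement is the Claim_ definition above) =====
theorem showMeTheMoney_spec : Claim_equal_showMeTheMoney := by
  intro l _ hpre
  unfold Spec_showMeTheMoney showMeTheMoney showMeTheMoney_alt
  dsimp only
  unfold Pre_showMeTheMoney at hpre
  have hlenv : (PySem.List.sorted (PySem.Set.ofList l) (fun x => x) false).length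
      = (PySem.Set.ofList l).length :=
    (PySem.List.sorted_perm (PySem.Set.ofList l) (fun x => x) false).length_eq
  have hpwlt := PySem.List.sorted_ofList_pairwise_lt l
  have hmemv : ∀ x, x ∈ PySem.List.sorted (PySem.Set.ofList l) (fun x => x) false ↔ x ∈ l := by
    intro x; rw [PySem.List.mem_sorted, PySem.Set.mem_ofList]
  have hndv : (PySem.List.sorted (PySem.Set.ofList l) (fun x => x) false).Nodup :=
    (PySem.List.sorted_perm _ _ _).nodup_iff.mpr (PySem.Set.nodup_ofList l)
  have hlperm := pvFlat_perm l _ hndv hmemv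
  have hflat := pvSorted_eq_flat l
  set vals := PySem.List.sorted (PySem.Set.ofList l) (fun x => x) false with hvals
  by_cases hD1 : (PySem.Set.ofList l).length = 1
  · rw [if_pos hD1, if_pos (hlenv.trans hD1)]
  · rw [if_neg hD1, if_neg (fun h => hD1 (hlenv.symm.trans h))]
    by_cases hD2 : (PySem.Set.ofList l).length = 2
    · rw [if_pos hD2, if_pos (hlenv.trans hD2)]
      obtain ⟨a, b, hab⟩ := List.length_eq_two.mp (hlenv.trans hD2)
      have haltb : a < b := by
        have := hpwlt; rw [hab] at this
        exact (List.pairwise_cons.mp this).1 b (by simp)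
      have hca1 : 1 ≤ l.count a := List.count_pos_iff.mpr ((hmemv a).mp (by rw [hab]; simp))
      have hcb1 : 1 ≤ l.count b := List.count_pos_iff.mpr ((hmemv b).mp (by rw [hab]; simp))
      have hn3 : 3 ≤ l.length := by
        rcases hpre with h | ⟨_, h⟩ | ⟨h, _⟩ | h <;> omega
      have hsum : l.count a + l.count b = l.length := by
        have := hlperm.length_eq
        rw [hab] at this
        simpa [pvFlat] using this
      rw [hab] at hflat
      simp only [pvFlat, List.flatMap_cons, List.flatMap_nil, List.append_nil] at hflat
      rw [hflat, hab]
      have hga : PySem.List.pyGetD [a, b] 0 0 = a := by simp [PySem.List.pyGetD_ofNat']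
      have hgb : PySem.List.pyGetD [a, b] 1 0 = b := by simp [PySem.List.pyGetD_ofNat']
      rw [hga, hgb, PySem.List.count_eq]
      by_cases h1 : List.count a l = 1
      · obtain ⟨k, hk⟩ : ∃ k, List.count b l = k + 2 := ⟨List.count b l - 2, by omega⟩
        rw [h1, hk]
        simp only [List.replicate_succ]
        norm_num [PySem.List.pyGetD_ofNat']
      · by_cases h2 : List.count a l = 2
        · obtain ⟨k, hk⟩ : ∃ k, List.count b l = k + 1 := ⟨List.count b l - 1, by omega⟩
          rw [h2, hk]
          simp only [List.replicate_succ]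
          rw [if_neg (by norm_num [PySem.List.pyGetD_ofNat']; omega)]
          norm_num [PySem.List.pyGetD_ofNat']
          ring
        · obtain ⟨k, hk⟩ : ∃ k, List.count a l = k + 3 := ⟨List.count a l - 3, by omega⟩
          rw [hk]
          simp only [List.replicate_succ]
          rw [if_neg (show ¬(k + 3 = 2) by omega), if_neg (show ¬(k + 3 = 1) by omega)]
          norm_num [PySem.List.pyGetD_ofNat']
    · rw [if_neg hD2, if_neg (fun h => hD2 (hlenv.symm.trans h))]
      by_cases hD3 : (PySem.Set.ofList l).length = 3
      · rw [if_pos hD3, if_pos (hlenv.trans hD3)]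
        obtain ⟨a, b, c, habc⟩ := List.length_eq_three.mp (hlenv.trans hD3)
        have hpw3 := hpwlt; rw [habc] at hpw3
        have haltb : a < b := (List.pairwise_cons.mp hpw3).1 b (by simp)
        have haltc : a < c := (List.pairwise_cons.mp hpw3).1 c (by simp)
        have hbltc : b < c :=
          (List.pairwise_cons.mp (List.pairwise_cons.mp hpw3).2).1 c (by simp)
        have hca1 : 1 ≤ l.count a := List.count_pos_iff.mpr ((hmemv a).mp (by rw [habc]; simp))
        have hcb1 : 1 ≤ l.count b := List.count_pos_iff.mpr ((hmemv b).mp (by rw [habc]; simp))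
        have hcc1 : 1 ≤ l.count c := List.count_pos_iff.mpr ((hmemv c).mp (by rw [habc]; simp))
        have hn4 : 4 ≤ l.length := by
          rcases hpre with h | ⟨h, _⟩ | ⟨_, h⟩ | h <;> omega
        have hsum : l.count a + l.count b + l.count c = l.length := by
          have := hlperm.length_eq
          rw [habc] at this
          simp [pvFlat] at this
          omega
        rw [habc] at hflat
        simp only [pvFlat, List.flatMap_cons, List.flatMap_nil, List.append_nil] at hflat
        rw [hflat, habc]
        simp only [PySem.List.count_eq]
        by_cases hA : 2 ≤ List.count a l
        · obtain ⟨k, hk⟩ : ∃ k, List.count a l = k + 2 := ⟨List.count a l - 2, by omega⟩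
          rw [hk]
          simp only [List.replicate_succ]
          have hfd : pvFd a (a :: (List.replicate k a ++
              (List.replicate (List.count b l) b ++ List.replicate (List.count c l) c))) = some a := by
            simp [pvFd]
          have hloop := pvLoop_finds _ [] a a hfd
          simp only [List.nil_append, List.length_nil, Nat.cast_zero] at hloop
          rw [List.cons_append, List.cons_append]
          rw [hloop]
          simp [List.find?, hk]
        · have hA1 : List.count a l = 1 := by omega
          by_cases hB : 2 ≤ List.count b l
          · obtain ⟨k, hk⟩ : ∃ k, List.count b l = k + 2 := ⟨List.count b l - 2, by omega⟩
            rw [hA1, hk]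
            simp only [List.replicate_succ, List.replicate_zero, List.nil_append, List.cons_append]
            have hfd : pvFd a (b :: b :: (List.replicate k b ++ List.replicate (List.count c l) c))
                = some b := by
              simp [pvFd, ne_of_gt haltb]
            have hloop := pvLoop_finds _ [] a b hfd
            simp only [List.nil_append, List.length_nil, Nat.cast_zero] at hloop
            rw [hloop]
            simp [List.find?, hA1, hk]
          · have hB1 : List.count b l = 1 := by omega
            have hC : 2 ≤ List.count c l := by omega
            obtain ⟨k, hk⟩ : ∃ k, List.count c l = k + 2 := ⟨List.count c l - 2, by omega⟩
            rw [hA1, hB1, hk]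
            simp only [List.replicate_succ, List.replicate_zero, List.nil_append, List.cons_append]
            have hfd : pvFd a (b :: c :: c :: List.replicate k c) = some c := by
              simp [pvFd, ne_of_gt haltb, ne_of_gt hbltc]
            have hloop := pvLoop_finds _ [] a c hfd
            simp only [List.nil_append, List.length_nil, Nat.cast_zero] at hloop
            rw [hloop]
            simp [List.find?, hA1, hB1, hk]
      · rw [if_neg hD3, if_neg (fun h => hD3 (hlenv.symm.trans h))]
        have hD4 : 4 ≤ (PySem.Set.ofList l).length := by
          rcases hpre with h | ⟨h, _⟩ | ⟨h, _⟩ | h <;> omega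
        have hcnts : ∀ v ∈ vals, 1 ≤ l.count v :=
          fun v hv => List.count_pos_iff.mpr ((hmemv v).mp hv)
        have hlen4 : 4 ≤ (pvFlat l vals).length := by
          have := pvFlat_length l vals hcnts
          omega
        have hord := pvOrdLoop_get l vals 0 (by norm_num) (by norm_num)
          (by norm_num; omega)
        norm_num at hord
        rw [hord, hflat]
        have : PySem.List.pyGetD (pvFlat l vals) 3 0 = (pvFlat l vals).getD 3 0 := by
          simp [PySem.List.pyGetD_ofNat']
        rw [this, List.getD_eq_getElem?_getD]
        rw [show Int.toNat 3 = 3 from rfl]
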